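-- pv_equiv track=rewrite | github.com/Vexionix/python-labs | pythonLab3/9.py | who_doesnt_see
-- ===== SOURCE A (Python) =====
-- def who_doesnt_see(participants):
--     list_of_people_that_dont_see = []
--     for i in range(0, len(participants), 1):
--         for j in range(0, len(participants[i]), 1):
--             for k in range(0, i, 1):
--                 if participants[i][j] <= participants[k][j]:
--                     list_of_people_that_dont_see.append((i,j))
--                     break
--     return list_of_people_that_dont_see
-- ===== SOURCE B (Python) =====
-- def who_doesnt_see(participants):
--     result = []
--     maxima = []
--     for i, row in enumerate(participants):
--         L = len(maxima)
--         for j, v in enumerate(row):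
--             if j < L and v <= maxima[j]:
--                 result.append((i, j))
--         for j in range(min(L, len(row))):
--             if row[j] > maxima[j]:
--                 maxima[j] = row[j]
--         if len(row) > L:
--             maxima.extend(row[L:])
--     return result
-- ===== Notes on version B (the rewrite author's own statement) =====
-- stated objective: faster
-- what changed: Instead of rescanning all earlier rows for every cell, B makes one pass over the grid keeping a running per-column maximum of the rows already seen, so each cell is an O(1) comparison.
import Mathlib
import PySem

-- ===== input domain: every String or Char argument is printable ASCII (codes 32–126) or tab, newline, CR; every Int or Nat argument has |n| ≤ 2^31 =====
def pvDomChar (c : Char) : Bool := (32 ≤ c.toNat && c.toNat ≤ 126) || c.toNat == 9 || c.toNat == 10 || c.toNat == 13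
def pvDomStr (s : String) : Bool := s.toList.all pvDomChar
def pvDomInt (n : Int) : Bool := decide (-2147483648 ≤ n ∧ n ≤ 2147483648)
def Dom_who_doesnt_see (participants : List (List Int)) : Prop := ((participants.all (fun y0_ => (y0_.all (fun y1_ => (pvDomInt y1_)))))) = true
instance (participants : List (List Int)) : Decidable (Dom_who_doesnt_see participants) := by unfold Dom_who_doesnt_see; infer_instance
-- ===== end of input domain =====

-- B replaces A's rescan of all earlier rows per cell by a single pass that keeps a running
-- per-column maximum of the rows already seen (objective: faster).

-- ===== PORT A =====
-- inner 'for k in range(0, i): if participants[i][j] <= participants[k][j]: append; break'.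
-- Python's participants[k][j] is an IndexError when row k is shorter; the port reads a
-- default 0 there and Pre_ excludes exactly the inputs on which Python reaches such an access.
def aAny (v : Int) (j : Nat) (P : List (List Int)) : List Nat → Bool
  | [] => false
  | k :: ks => if v ≤ (P.getD k []).getD j 0 then true else aAny v j P ks

def who_doesnt_see (participants : List (List Int)) : List (Int × Int) :=
  (List.range participants.length).foldl (fun acc i =>
    (List.range (participants.getD i []).length).foldl (fun acc2 j =>
      if aAny ((participants.getD i []).getD j 0) j participants (List.range i) then
        acc2 ++ [((i : Int), (j : Int))]
      else acc2) acc) []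

-- ===== PORT B =====
-- 'for j, v in enumerate(row): if j < len(maxima) and v <= maxima[j]: result.append((i, j))'
def altScanRow (i : Nat) (maxima : List Int) (j : Nat) : List Int → List (Int × Int)
  | [] => []
  | v :: rest =>
      (if j < maxima.length ∧ v ≤ maxima.getD j 0 then [((i : Int), (j : Int))] else []) ++
        altScanRow i maxima (j + 1) rest

-- 'for j in range(min(L, len(row))): if row[j] > maxima[j]: maxima[j] = row[j]'
def altBumpStep (r : List Int) (ms : List Int) (j : Nat) : List Int :=
  if ms.getD j 0 < r.getD j 0 then ms.set j (r.getD j 0) else ms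

def altBump (maxima row : List Int) : List Int :=
  (List.range (min maxima.length row.length)).foldl (altBumpStep row) maxima

-- 'if len(row) > L: maxima.extend(row[L:])'
def altUpdate (maxima row : List Int) : List Int :=
  if maxima.length < row.length then altBump maxima row ++ row.drop maxima.length
  else altBump maxima row

def altGo (i : Nat) (maxima : List Int) : List (List Int) → List (Int × Int)
  | [] => []
  | row :: rest => altScanRow i maxima 0 row ++ altGo (i + 1) (altUpdate maxima row) rest

def who_doesnt_see_alt (participants : List (List Int)) : List (Int × Int) :=
  altGo 0 [] participants

-- ===== PRECONDITION & SPEC =====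
-- Pre_ excludes exactly the inputs on which the Python A raises IndexError: some cell (i,j)
-- scans an earlier row k too short for column j before any earlier row triggered the break.
def Pre_who_doesnt_see (participants : List (List Int)) : Prop :=
  ∀ i < participants.length, ∀ j < (participants.getD i []).length, ∀ k < i,
    (participants.getD k []).length ≤ j →
      ∃ k' < k, j < (participants.getD k' []).length ∧
        (participants.getD i []).getD j 0 ≤ (participants.getD k' []).getD j 0

instance (participants : List (List Int)) : Decidable (Pre_who_doesnt_see participants) := by
  unfold Pre_who_doesnt_see; exact Nat.decidableBallLT _ _

def pvWitness_who_doesnt_see : List (List Int) := [[1, 2], [2, 1], [0, 5]]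

def Spec_who_doesnt_see (participants : List (List Int)) (out : List (Int × Int)) : Prop := out = who_doesnt_see_alt participants
instance (participants : List (List Int)) (out : List (Int × Int)) : Decidable (Spec_who_doesnt_see participants out) := by unfold Spec_who_doesnt_see; infer_instance

-- ===== CLAIM (what is proved, stated in full; the proofs are below) =====
def Claim_equal_who_doesnt_see : Prop := ∀ (participants : List (List Int)), Dom_who_doesnt_see participants → Pre_who_doesnt_see participants → Spec_who_doesnt_see participants (who_doesnt_see participants)

-- ===== LEMMAS AND PROOFS =====

-- merging of options by max: the pointwise effect of altUpdate
def omax : Option Int → Option Int → Option Int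
  | none, b => b
  | some v, none => some v
  | some v, some m => some (max v m)

theorem omax_none_right (a : Option Int) : omax a none = a := by
  cases a <;> rfl

theorem length_bumpFold (r ms : List Int) (l : List Nat) :
    (l.foldl (altBumpStep r) ms).length = ms.length := by
  induction l generalizing ms with
  | nil => rfl
  | cons j l ih =>
    rw [List.foldl_cons, ih]
    unfold altBumpStep
    split_ifs <;> simp

theorem altBumpStep_eq (r ms : List Int) (j : Nat) :
    altBumpStep r ms j = if ms.getD j 0 < r.getD j 0 then ms.set j (r.getD j 0) else ms := rfl

theorem bumpFold_getElem? (ms r : List Int) (n : Nat) (hn : n ≤ min ms.length r.length) :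
    ∀ k, ((List.range n).foldl (altBumpStep r) ms)[k]? =
      if k < n then omax r[k]? ms[k]? else ms[k]? := by
  induction n with
  | zero => simp
  | succ n ih =>
    intro k
    have hn' : n ≤ min ms.length r.length := by omega
    have hnm : n < ms.length := by omega
    have hnr : n < r.length := by omega
    rw [List.range_succ, List.foldl_append, List.foldl_cons, List.foldl_nil]
    have hFn : ((List.range n).foldl (altBumpStep r) ms)[n]? = some ms[n] := by
      rw [ih hn' n, if_neg (lt_irrefl n), List.getElem?_eq_getElem hnm]
    have hFlen : ((List.range n).foldl (altBumpStep r) ms).length = ms.length :=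
      length_bumpFold r ms (List.range n)
    have hgD : ((List.range n).foldl (altBumpStep r) ms).getD n 0 = ms[n] := by
      rw [List.getD_eq_getElem?_getD, hFn, Option.getD_some]
    have hgr : r.getD n 0 = r[n] := by
      rw [List.getD_eq_getElem?_getD, List.getElem?_eq_getElem hnr, Option.getD_some]
    rw [altBumpStep_eq, hgD, hgr]
    by_cases hk : k = n
    · subst hk
      rw [if_pos (Nat.lt_succ_self k)]
      by_cases hlt : ms[k] < r[k]
      · rw [if_pos hlt, List.getElem?_set_self (by rw [hFlen]; omega),
          List.getElem?_eq_getElem hnr, List.getElem?_eq_getElem hnm]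
        simp [omax, max_eq_left (le_of_lt hlt)]
      · rw [if_neg hlt, hFn,
          List.getElem?_eq_getElem hnr, List.getElem?_eq_getElem hnm]
        simp [omax, max_eq_right (le_of_not_gt hlt)]
    · have hiff : (k < n + 1) = (k < n) := by
        apply propext; constructor <;> intro h <;> omega
      simp only [hiff]
      by_cases hlt : ms[n] < r[n]
      · rw [if_pos hlt, List.getElem?_set_ne (by omega), ih hn' k]
      · rw [if_neg hlt, ih hn' k]

theorem altUpdate_getElem? (ms r : List Int) (k : Nat) :
    (altUpdate ms r)[k]? = omax r[k]? ms[k]? := by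
  unfold altUpdate altBump
  split_ifs with h
  · have hmin : min ms.length r.length = ms.length := by omega
    rw [hmin]
    by_cases hk : k < ms.length
    · rw [List.getElem?_append_left (by rw [length_bumpFold]; exact hk),
        bumpFold_getElem? ms r ms.length (by omega) k, if_pos hk]
    · rw [List.getElem?_append_right (by rw [length_bumpFold]; omega)]
      rw [length_bumpFold, List.getElem?_drop]
      have h1 : ms.length + (k - ms.length) = k := by omega
      rw [h1, List.getElem?_eq_none (l := ms) (by omega), omax_none_right]
  · have hmin : min ms.length r.length = r.length := by omega
    rw [hmin]
    rw [bumpFold_getElem? ms r r.length (by omega) k]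
    by_cases hk : k < r.length
    · rw [if_pos hk]
    · rw [if_neg hk, List.getElem?_eq_none (l := r) (by omega)]
      rfl

theorem foldl_altUpdate_getElem? (prev : List (List Int)) (ms : List Int) (j : Nat) :
    (List.foldl altUpdate ms prev)[j]? =
      List.foldl (fun a r => omax r[j]? a) ms[j]? prev := by
  induction prev generalizing ms with
  | nil => rfl
  | cons r rest ih => simpa [altUpdate_getElem?] using ih (altUpdate ms r)

theorem omax_le (v : Int) (a b : Option Int) :
    (∃ m, omax a b = some m ∧ v ≤ m) ↔
      (∃ w, a = some w ∧ v ≤ w) ∨ (∃ w, b = some w ∧ v ≤ w) := by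
  cases a <;> cases b <;> simp [omax]

theorem foldl_omax_le (j : Nat) (prev : List (List Int)) (a : Option Int) (v : Int) :
    (∃ m, List.foldl (fun a r => omax r[j]? a) a prev = some m ∧ v ≤ m) ↔
      (∃ m, a = some m ∧ v ≤ m) ∨ ∃ r ∈ prev, ∃ w, r[j]? = some w ∧ v ≤ w := by
  induction prev generalizing a with
  | nil => simp
  | cons r rest ih =>
    rw [List.foldl_cons, ih, omax_le]
    simp only [List.mem_cons, exists_eq_or_imp]
    rw [or_assoc, or_left_comm]

-- the condition B tests against the running maxima, characterized over the previous rows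
theorem maxima_cond (prev : List (List Int)) (j : Nat) (v : Int) :
    (j < (List.foldl altUpdate [] prev).length ∧
        v ≤ (List.foldl altUpdate [] prev).getD j 0) ↔
      ∃ r ∈ prev, j < r.length ∧ v ≤ r.getD j 0 := by
  have key : (∃ m, (List.foldl altUpdate [] prev)[j]? = some m ∧ v ≤ m) ↔
      ∃ r ∈ prev, ∃ w, r[j]? = some w ∧ v ≤ w := by
    rw [foldl_altUpdate_getElem?]
    simpa using foldl_omax_le j prev (([] : List Int))[j]? v
  constructor
  · rintro ⟨hj, hv⟩
    rw [List.getD_eq_getElem?_getD, List.getElem?_eq_getElem hj, Option.getD_some] at hv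
    rcases key.mp ⟨_, List.getElem?_eq_getElem hj, hv⟩ with ⟨r, hr, w, hw, hvw⟩
    rcases List.getElem?_eq_some_iff.mp hw with ⟨hlt, hval⟩
    refine ⟨r, hr, hlt, ?_⟩
    rw [List.getD_eq_getElem?_getD, List.getElem?_eq_getElem hlt, Option.getD_some, hval]
    exact hvw
  · rintro ⟨r, hr, hlt, hv⟩
    rw [List.getD_eq_getElem?_getD, List.getElem?_eq_getElem hlt, Option.getD_some] at hv
    rcases key.mpr ⟨r, hr, r[j], List.getElem?_eq_getElem hlt, hv⟩ with ⟨m, hm, hvm⟩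
    rcases List.getElem?_eq_some_iff.mp hm with ⟨hjlt, hval⟩
    refine ⟨hjlt, ?_⟩
    rw [List.getD_eq_getElem?_getD, List.getElem?_eq_getElem hjlt, Option.getD_some, hval]
    exact hvm

-- membership in a take-prefix, by index
theorem mem_take_iff (P : List (List Int)) (i : Nat) (hi : i ≤ P.length) (r : List Int) :
    r ∈ P.take i ↔ ∃ k < i, r = P.getD k [] := by
  rw [List.mem_take_iff_getElem]
  constructor
  · rintro ⟨k, hk, rfl⟩
    have hki : k < i := lt_of_lt_of_le hk (min_le_left _ _)
    have hkP : k < P.length := lt_of_lt_of_le hk (min_le_right _ _)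
    exact ⟨k, hki, by rw [List.getD_eq_getElem?_getD, List.getElem?_eq_getElem hkP, Option.getD_some]⟩
  · rintro ⟨k, hki, rfl⟩
    have hkP : k < P.length := lt_of_lt_of_le hki hi
    exact ⟨k, lt_min hki hkP, by rw [List.getD_eq_getElem?_getD, List.getElem?_eq_getElem hkP, Option.getD_some]⟩

-- A's break-scan is an existential over the scanned indices
theorem aAny_iff (v : Int) (j : Nat) (P : List (List Int)) (l : List Nat) :
    aAny v j P l = true ↔ ∃ k ∈ l, v ≤ (P.getD k []).getD j 0 := by
  induction l with
  | nil => simp [aAny]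
  | cons k ks ih =>
    simp only [aAny]
    split_ifs with h
    · constructor
      · intro _; exact ⟨k, List.mem_cons_self, h⟩
      · intro _; rfl
    · constructor
      · intro ht
        rcases ih.mp ht with ⟨k', hk', hv⟩
        exact ⟨k', List.mem_cons_of_mem _ hk', hv⟩
      · rintro ⟨k', hk', hv⟩
        rcases List.mem_cons.mp hk' with rfl | hm
        · exact absurd hv h
        · exact ih.mpr ⟨k', hm, hv⟩

-- normal form of port B's row scan
theorem altScanRow_eq (i : Nat) (maxima : List Int) (row : List Int) (j0 : Nat) :
    altScanRow i maxima j0 row =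
      (List.range row.length).flatMap (fun t =>
        if j0 + t < maxima.length ∧ row.getD t 0 ≤ maxima.getD (j0 + t) 0 then
          [((i : Int), ((j0 + t : Nat) : Int))]
        else []) := by
  induction row generalizing j0 with
  | nil => simp [altScanRow]
  | cons v rest ih =>
    rw [altScanRow, List.length_cons, List.range_succ_eq_map, List.flatMap_cons,
      List.flatMap_map, ih (j0 + 1)]
    refine congrArg₂ (· ++ ·) rfl (List.flatMap_congr ?_)
    intro t _
    have h1 : j0 + 1 + t = j0 + (t + 1) := by omega
    rw [h1]
    simp only [Nat.succ_eq_add_one, List.getD_cons_succ]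

-- normal form of port B's row loop
theorem altGo_eq (rows : List (List Int)) (i0 : Nat) (m0 : List Int) :
    altGo i0 m0 rows =
      (List.range rows.length).flatMap (fun t =>
        altScanRow (i0 + t) (List.foldl altUpdate m0 (rows.take t)) 0 (rows.getD t [])) := by
  induction rows generalizing i0 m0 with
  | nil => simp [altGo]
  | cons row rest ih =>
    rw [altGo, List.length_cons, List.range_succ_eq_map, List.flatMap_cons,
      List.flatMap_map, ih (i0 + 1) (altUpdate m0 row)]
    refine congrArg₂ (· ++ ·) rfl (List.flatMap_congr ?_)
    intro t _
    have h1 : i0 + 1 + t = i0 + (t + 1) := by omega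
    rw [h1]
    simp only [Nat.succ_eq_add_one, List.take_succ_cons, List.foldl_cons, List.getD_cons_succ]

-- normal form of port A
theorem who_doesnt_see_eq (P : List (List Int)) :
    who_doesnt_see P =
      (List.range P.length).flatMap (fun i =>
        (List.range (P.getD i []).length).flatMap (fun j =>
          if aAny ((P.getD i []).getD j 0) j P (List.range i) then
            [((i : Int), (j : Int))]
          else [])) := by
  unfold who_doesnt_see
  rw [PySem.List.foldl_congr_mem (g := fun acc i =>
    acc ++ (List.range (P.getD i []).length).flatMap (fun j =>
      if aAny ((P.getD i []).getD j 0) j P (List.range i) then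
        [((i : Int), (j : Int))]
      else []))]
  · rw [PySem.List.foldl_append_eq_flatMap]; simp
  · intro acc i _
    rw [← PySem.List.foldl_append_eq_flatMap]
    apply PySem.List.foldl_congr_mem
    intro acc2 j _
    split_ifs <;> simp

-- the per-cell condition: A's break-scan agrees with B's maxima test, given Pre_
theorem cell_cond (P : List (List Int)) (hP : Pre_who_doesnt_see P)
    (i : Nat) (hi : i < P.length) (j : Nat) (hj : j < (P.getD i []).length) :
    (aAny ((P.getD i []).getD j 0) j P (List.range i) = true) ↔
      (j < (List.foldl altUpdate [] (P.take i)).length ∧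
        (P.getD i []).getD j 0 ≤ (List.foldl altUpdate [] (P.take i)).getD j 0) := by
  rw [aAny_iff, maxima_cond]
  constructor
  · rintro ⟨k, hk, hv⟩
    rw [List.mem_range] at hk
    by_cases hlen : j < (P.getD k []).length
    · exact ⟨P.getD k [], (mem_take_iff P i (le_of_lt hi) _).mpr ⟨k, hk, rfl⟩, hlen, hv⟩
    · rcases hP i hi j hj k hk (le_of_not_gt hlen) with ⟨k', hk', hlen', hv'⟩
      exact ⟨P.getD k' [], (mem_take_iff P i (le_of_lt hi) _).mpr ⟨k', lt_trans hk' hk, rfl⟩,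
        hlen', hv'⟩
  · rintro ⟨r, hr, hlen, hv⟩
    rcases (mem_take_iff P i (le_of_lt hi) _).mp hr with ⟨k, hk, rfl⟩
    exact ⟨k, List.mem_range.mpr hk, hv⟩

-- ===== VERDICT (by name: the statement is the Claim_ definition above) =====
theorem who_doesnt_see_spec : Claim_equal_who_doesnt_see := by
  intro P _ hP
  unfold Spec_who_doesnt_see who_doesnt_see_alt
  rw [who_doesnt_see_eq, altGo_eq]
  apply List.flatMap_congr
  intro i hiR
  rw [List.mem_range] at hiR
  rw [altScanRow_eq]
  apply List.flatMap_congr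
  intro j hj
  rw [List.mem_range] at hj
  have hc := cell_cond P hP i hiR j hj
  simp only [Nat.zero_add]
  by_cases hA : aAny ((P.getD i []).getD j 0) j P (List.range i) = true
  · rw [if_pos hA, if_pos (hc.mp hA)]
  · rw [if_neg hA, if_neg (fun h => hA (hc.mpr h))]
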